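-- pv_equiv track=rewrite | github.com/Electron-Labs/zk-verifier | field/utils.py | div2
-- ===== SOURCE A (Python) =====
-- def div2(num):
--     t = 0
--     idx = len(num) - 1
--
--     for i in reversed(num):
--         t2 = i << 63
--         i >>= 1
--         i |= t
--         t = t2
--         num[idx] = i
--         idx -= 1
--
--     return num
-- ===== SOURCE B (Python) =====
-- def div2(num):
--     # Forward single pass, no carry variable: each output limb is
--     # (cur >> 1) | (next << 63) with 0 past the end; num[j+1] is read
--     # (via the zip snapshot) before it is overwritten, so no copy needed.
--     for j, (cur, nxt) in enumerate(zip(num, num[1:] + [0])):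
--         num[j] = (cur >> 1) | (nxt << 63)
--     return num
-- ===== Notes on version B (the rewrite author's own statement) =====
-- stated objective: simpler
-- what changed: Replaces the reversed-iteration loop with a running carry accumulator (t/t2) and a manually decremented index by a forward enumerate over each limb zipped with its right neighbor (0 past the end), computing (cur >> 1) | (nxt << 63) directly with no carry state.
import Mathlib
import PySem

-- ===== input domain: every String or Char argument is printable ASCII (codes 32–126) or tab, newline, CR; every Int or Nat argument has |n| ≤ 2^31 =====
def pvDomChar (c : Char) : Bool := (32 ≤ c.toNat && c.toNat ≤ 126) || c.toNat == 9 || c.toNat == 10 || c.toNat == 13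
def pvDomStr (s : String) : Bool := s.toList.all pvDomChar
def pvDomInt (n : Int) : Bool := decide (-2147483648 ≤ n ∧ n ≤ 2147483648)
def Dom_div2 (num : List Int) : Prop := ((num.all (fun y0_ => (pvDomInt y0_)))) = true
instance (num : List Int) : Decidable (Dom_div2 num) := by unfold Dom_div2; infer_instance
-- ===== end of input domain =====

-- B differs from A only in decomposition (forward neighbor pass vs reversed carry loop);
-- both mutate num in place identically, and the equivalence proved is about the return value.

-- ===== PORT A =====
-- A: iterate over reversed(num) with carry t and explicit index idx, writing num[idx] in place.
def div2Step (s : Int × Int × List Int) (i : Int) : Int × Int × List Int :=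
  let t := s.1
  let idx := s.2.1
  let arr := s.2.2
  let t2 := i <<< (63 : Nat)          -- i << 63
  let i1 := i >>> (1 : Nat)           -- i >>= 1  (Python arithmetic shift = Lean >>> on Int)
  let i2 := PySem.Int.bor i1 t        -- i |= t
  (t2, idx - 1, arr.set idx.toNat i2) -- num[idx] = i; idx -= 1  (idx ≥ 0 throughout the loop)

def div2 (num : List Int) : List Int :=
  (num.reverse.foldl div2Step (0, (num.length : Int) - 1, num)).2.2

-- ===== PORT B =====
-- B: forward pass writing each slot from the zip snapshot of (limb, right neighbor, 0 at end);
-- since index j is written exactly once with a value drawn from the snapshot, the in-place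
-- enumerate loop produces exactly this map.
def div2_alt (num : List Int) : List Int :=
  (num.zip (num.drop 1 ++ [0])).map
    (fun (p : Int × Int) => PySem.Int.bor (p.1 >>> (1 : Nat)) (p.2 <<< (63 : Nat)))

-- ===== PRECONDITION & SPEC =====
def Spec_div2 (num : List Int) (out : List Int) : Prop := out = div2_alt num
instance (num : List Int) (out : List Int) : Decidable (Spec_div2 num out) := by unfold Spec_div2; infer_instance

-- ===== CLAIM (what is proved, stated in full; the proofs are below) =====
def Claim_equal_div2 : Prop := ∀ (num : List Int), Dom_div2 num → Spec_div2 num (div2 num)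

-- ===== LEMMAS AND PROOFS =====

-- carry flowing out of processing a suffix: the shifted first element, or the initial carry
def carryOut (ys : List Int) (t0 : Int) : Int :=
  match ys with
  | [] => t0
  | y :: _ => y <<< (63 : Nat)

-- the values A writes for a block ys whose right neighbor contributes carry t0
def gVals (ys : List Int) (t0 : Int) : List Int :=
  match ys with
  | [] => []
  | y :: ys' => PySem.Int.bor (y >>> (1 : Nat)) (carryOut ys' t0) :: gVals ys' t0

-- W p vs arr : overwrite arr at positions p, p+1, … with vs (written right-to-left, as A does)
def wSet (p : Nat) (vs : List Int) (arr : List Int) : List Int :=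
  match vs with
  | [] => arr
  | v :: vs' => (wSet (p + 1) vs' arr).set p v

theorem gVals_length (ys : List Int) (t0 : Int) : (gVals ys t0).length = ys.length := by
  induction ys with
  | nil => rfl
  | cons y ys ih => simp [gVals, ih]

theorem foldr_div2Step (ys : List Int) (t0 : Int) (p : Nat) (arr : List Int) :
    List.foldr (fun x s => div2Step s x) (t0, (p : Int) + ys.length - 1, arr) ys
      = (carryOut ys t0, (p : Int) - 1, wSet p (gVals ys t0) arr) := by
  induction ys generalizing p with
  | nil => simp [carryOut, gVals, wSet]
  | cons y ys ih =>
    have h : ((p : Int)) + ((y :: ys).length : Int) - 1 = ((p + 1 : Nat) : Int) + ys.length - 1 := by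
      simp only [List.length_cons]; push_cast; ring
    rw [List.foldr_cons, h, ih (p + 1)]
    simp [div2Step, carryOut, gVals, wSet]

theorem wSet_eq (vs : List Int) (arr : List Int) (p : Nat)
    (h : p + vs.length = arr.length) :
    wSet p vs arr = arr.take p ++ vs := by
  induction vs generalizing p with
  | nil =>
    simp only [List.length_nil, Nat.add_zero] at h
    simp [wSet, h]
  | cons v vs ih =>
    simp only [List.length_cons] at h
    have h' : (p + 1) + vs.length = arr.length := by omega
    have hp : p < arr.length := by omega
    rw [wSet, ih (p + 1) h']
    have htake : arr.take (p + 1) = arr.take p ++ [arr[p]] := by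
      rw [List.take_add_one, List.getElem?_eq_getElem hp]
      rfl
    have hlen : p < (arr.take (p + 1)).length := by
      simp [List.length_take]; omega
    rw [List.set_append_left _ _ hlen, htake,
        List.set_append_right _ _ (by simp [List.length_take])]
    simp [List.length_take, Nat.min_eq_left (Nat.le_of_lt hp)]

theorem gVals_eq_alt (ys : List Int) :
    gVals ys 0 = div2_alt ys := by
  unfold div2_alt
  induction ys with
  | nil => rfl
  | cons y ys ih =>
    cases ys with
    | nil => simp [gVals, carryOut]
    | cons y' ys' =>
      simp only [List.drop_succ_cons, List.drop_zero] at ih ⊢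
      rw [gVals]
      have : (y :: y' :: ys').zip ((y' :: ys') ++ [0]) = (y, y') :: (y' :: ys').zip (ys' ++ [0]) := by
        simp [List.zip]
      rw [this, List.map_cons, ← ih]
      rfl

-- ===== VERDICT (by name: the statement is the Claim_ definition above) =====
theorem div2_spec : Claim_equal_div2 := by
  intro num _
  show div2 num = div2_alt num
  unfold div2
  rw [List.foldl_reverse]
  have h0 : ((num.length : Int) - 1) = ((0 : Nat) : Int) + num.length - 1 := by push_cast; ring
  rw [h0, foldr_div2Step num 0 0 num]
  simp only
  rw [wSet_eq (gVals num 0) num 0 (by simp [gVals_length])]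
  simp [gVals_eq_alt]
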